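-- pv_equiv track=rewrite | github.com/Jarvvski/Python-Scripts | UmlTables.py | createTables
-- ===== SOURCE A (Python) =====
-- def createTables(num):
--     table = ["| Item | Content |","|:-|:-|","| ID | UC01 |","| Name |  |","| Description |  |",
--     "| Pre Condt. |  |","| Event Flow |  |","| Includes |  |","| Extensions |  |",
--     "| Triggers |  |","| Post Condt. |  |"];
--     newline = "\n";
--     output = "";
--     for x in range(0,num):
--         for i in range(0,len(table)):
--             if (i == 2):
--                 id = "";
--                 if (x < 10):
--                     id = "UC0" + str(x+1);
--                 else:
--                     id = "UC" + str(x+1);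
--                 output = output + "| ID | " + id + " |";
--             else:
--                 output = output + table[i];
--             output = output + newline;
--         output = output + newline;
--     return output;
-- ===== SOURCE B (Python) =====
-- def createTables(num):
--     prefix = "| Item | Content |\n|:-|:-|\n"
--     suffix = ("| Name |  |\n| Description |  |\n| Pre Condt. |  |\n"
--               "| Event Flow |  |\n| Includes |  |\n| Extensions |  |\n"
--               "| Triggers |  |\n| Post Condt. |  |\n\n")
--     blocks = []
--     for x in range(num):
--         uc = ("UC0" if x < 10 else "UC") + str(x + 1)
--         blocks.append(prefix + "| ID | " + uc + " |\n" + suffix)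
--     return "".join(blocks)
-- ===== Notes on version B (the rewrite author's own statement) =====
-- stated objective: simpler
-- what changed: B precomputes the fixed table block as one prefix/suffix template, runs a single loop splicing the UC id into it, and joins the collected blocks at the end, removing A's inner per-line loop with its index check and A's repeated string concatenation.
import Mathlib
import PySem

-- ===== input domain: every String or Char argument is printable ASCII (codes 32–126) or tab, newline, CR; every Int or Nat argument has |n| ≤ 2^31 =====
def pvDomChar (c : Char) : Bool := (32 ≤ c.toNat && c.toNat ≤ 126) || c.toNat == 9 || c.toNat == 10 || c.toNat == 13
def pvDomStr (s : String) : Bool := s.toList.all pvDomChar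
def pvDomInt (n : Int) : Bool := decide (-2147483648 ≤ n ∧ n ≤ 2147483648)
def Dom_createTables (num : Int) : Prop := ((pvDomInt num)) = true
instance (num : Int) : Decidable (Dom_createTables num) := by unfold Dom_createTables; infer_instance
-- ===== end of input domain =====

-- B builds each fixed 11-line block as one template string in a single loop (prefix + ID line + suffix),
-- replacing A's inner per-line loop with its i == 2 check; objective: simpler, same output.

-- ===== PORT A =====
def pvTable : List String :=
  ["| Item | Content |","|:-|:-|","| ID | UC01 |","| Name |  |","| Description |  |",
   "| Pre Condt. |  |","| Event Flow |  |","| Includes |  |","| Extensions |  |",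
   "| Triggers |  |","| Post Condt. |  |"]

def createTables (num : Int) : String :=
  (PySem.List.pyRange 0 num 1).foldl (fun output x =>
    ((PySem.List.pyRange 0 (Int.ofNat pvTable.length) 1).foldl (fun output i =>
      (if i == 2 then
        let id : String := if x < 10 then "UC0" ++ PySem.Int.toStr (x + 1)
                           else "UC" ++ PySem.Int.toStr (x + 1)
        output ++ "| ID | " ++ id ++ " |"
      else
        output ++ PySem.List.pyGetD pvTable i "") ++ "\n") output) ++ "\n") ""

-- ===== PORT B =====
def pvPrefix : String := "| Item | Content |\n|:-|:-|\n"
def pvSuffix : String :=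
  "| Name |  |\n| Description |  |\n| Pre Condt. |  |\n| Event Flow |  |\n| Includes |  |\n| Extensions |  |\n| Triggers |  |\n| Post Condt. |  |\n\n"

def createTables_alt (num : Int) : String :=
  String.join ((PySem.List.pyRange 0 num 1).map (fun x =>
    let uc := (if x < 10 then "UC0" else "UC") ++ PySem.Int.toStr (x + 1)
    pvPrefix ++ "| ID | " ++ uc ++ " |\n" ++ pvSuffix))

-- ===== PRECONDITION & SPEC =====
def Spec_createTables (num : Int) (out : String) : Prop := out = createTables_alt num
instance (num : Int) (out : String) : Decidable (Spec_createTables num out) := by unfold Spec_createTables; infer_instance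

-- ===== CLAIM (what is proved, stated in full; the proofs are below) =====
def Claim_equal_createTables : Prop := ∀ (num : Int), Dom_createTables num → Spec_createTables num (createTables num)

-- ===== LEMMAS AND PROOFS =====

-- One outer iteration of A appends exactly B's template block.
theorem pv_inner_block (out : String) (x : Int) :
    ((PySem.List.pyRange 0 (Int.ofNat pvTable.length) 1).foldl (fun output i =>
      (if i == 2 then
        let id : String := if x < 10 then "UC0" ++ PySem.Int.toStr (x + 1)
                           else "UC" ++ PySem.Int.toStr (x + 1)
        output ++ "| ID | " ++ id ++ " |"
      else
        output ++ PySem.List.pyGetD pvTable i "") ++ "\n") out) ++ "\n"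
    = out ++ (pvPrefix ++ "| ID | " ++ ((if x < 10 then "UC0" else "UC") ++ PySem.Int.toStr (x + 1)) ++ " |\n" ++ pvSuffix) := by
  have hr : PySem.List.pyRange 0 (Int.ofNat pvTable.length) 1 = [0,1,2,3,4,5,6,7,8,9,10] := by decide
  rw [hr]
  by_cases h : x < 10 <;>
    simp [h, List.foldl, pvTable, pvPrefix, pvSuffix, PySem.List.pyGetD, PySem.List.pyGet?,
      PySem.List.pyIdx?, String.append_assoc]

-- foldl of ++ pulls the seed out front (used for String.join on a cons).
theorem pv_foldl_append (l : List String) (s : String) :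
    l.foldl (· ++ ·) s = s ++ l.foldl (· ++ ·) "" := by
  induction l generalizing s with
  | nil => simp
  | cons t l ih =>
    rw [List.foldl_cons, List.foldl_cons, ih (s ++ t), ih ("" ++ t)]
    simp [String.append_assoc]

theorem pv_join_cons (s : String) (l : List String) :
    String.join (s :: l) = s ++ String.join l := by
  simp only [String.join, List.foldl_cons]
  rw [pv_foldl_append l ("" ++ s)]
  simp

-- A's fold over any index list equals B's joined blocks, with a general accumulator.
theorem pv_fold_eq (l : List Int) (out : String) :
    l.foldl (fun output x =>
      ((PySem.List.pyRange 0 (Int.ofNat pvTable.length) 1).foldl (fun output i =>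
        (if i == 2 then
          let id : String := if x < 10 then "UC0" ++ PySem.Int.toStr (x + 1)
                             else "UC" ++ PySem.Int.toStr (x + 1)
          output ++ "| ID | " ++ id ++ " |"
        else
          output ++ PySem.List.pyGetD pvTable i "") ++ "\n") output) ++ "\n") out
    = out ++ String.join (l.map (fun x =>
        let uc := (if x < 10 then "UC0" else "UC") ++ PySem.Int.toStr (x + 1)
        pvPrefix ++ "| ID | " ++ uc ++ " |\n" ++ pvSuffix)) := by
  induction l generalizing out with
  | nil => simp [String.join]
  | cons x l ih =>
    rw [List.foldl_cons, ih, pv_inner_block]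
    simp [pv_join_cons, String.append_assoc]

-- ===== VERDICT (by name: the statement is the Claim_ definition above) =====
theorem createTables_spec : Claim_equal_createTables := by
  intro num _
  unfold Spec_createTables createTables createTables_alt
  rw [pv_fold_eq]
  simp
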